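-- pv_equiv track=rewrite | github.com/dhatrisahu/DSA-Solutions | Find Total Time Taken - GFG/find-total-time-taken.py | totalTime
-- ===== SOURCE A (Python) =====
-- from typing import List
--
-- def totalTime(n : int, arr : List[int], time : List[int]) -> int:
--     last_pick_time = {}
--     total_time = 0
--
--     for i in range(n):
--         if arr[i] not in last_pick_time:
--             total_time += 1
--             last_pick_time[arr[i]] = i
--         else:
--             total_time += time[arr[i]-1]
--             last_pick_time[arr[i]] = i
--
--     return total_time - 1
-- ===== SOURCE B (Python) =====
-- def totalTime(n, arr, time):
--     cnt = {}
--     for i in range(n):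
--         v = arr[i]
--         cnt[v] = cnt.get(v, 0) + 1
--     total = 0
--     for v, c in cnt.items():
--         total += 1 if c == 1 else 1 + (c - 1) * time[v - 1]
--     return total - 1
-- ===== Notes on version B (the rewrite author's own statement) =====
-- stated objective: alternative
-- what changed: Replaces A's sequential seen-dict scan (per-element membership test deciding +1 vs +time) with a count-then-aggregate pass: build a frequency map over range(n), then sum 1 + (c-1)*time[v-1] over the distinct values, which never touches time for singleton values.
import Mathlib
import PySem

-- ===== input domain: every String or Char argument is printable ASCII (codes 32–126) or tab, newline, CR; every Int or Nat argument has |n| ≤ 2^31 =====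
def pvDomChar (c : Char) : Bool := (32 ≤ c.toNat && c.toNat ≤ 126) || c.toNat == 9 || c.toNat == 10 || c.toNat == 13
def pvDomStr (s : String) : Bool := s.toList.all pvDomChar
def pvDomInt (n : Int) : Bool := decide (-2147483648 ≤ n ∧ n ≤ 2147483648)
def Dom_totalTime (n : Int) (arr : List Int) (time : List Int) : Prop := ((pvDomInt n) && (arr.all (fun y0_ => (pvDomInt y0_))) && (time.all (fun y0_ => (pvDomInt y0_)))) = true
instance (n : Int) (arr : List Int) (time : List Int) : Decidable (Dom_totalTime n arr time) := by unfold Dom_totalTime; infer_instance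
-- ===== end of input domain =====

-- B replaces A's sequential seen-dict scan with a count-then-aggregate pass over the distinct values (alternative decomposition, same cost).


-- ===== PORT A =====
-- arr[i] / time[arr[i]-1] are ported with pyGetD; Pre_ confines the claim to inputs where the Python indexing succeeds.
def totalTime (n : Int) (arr : List Int) (time : List Int) : Int :=
  (((PySem.List.pyRange 0 n 1).foldl
      (fun (st : PySem.Dict Int Int × Int) i =>
        let v := PySem.List.pyGetD arr i 0
        if st.1.contains v = false then
          (st.1.insert v i, st.2 + 1)
        else
          (st.1.insert v i, st.2 + PySem.List.pyGetD time (v - 1) 0))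
      (PySem.Dict.empty, 0)).2) - 1

-- ===== PORT B =====
-- phase 1 of Source B: the frequency dict built over range(n)
def pvCount (n : Int) (arr : List Int) : PySem.Dict Int Int :=
  (PySem.List.pyRange 0 n 1).foldl
    (fun d i =>
      let v := PySem.List.pyGetD arr i 0
      d.insert v (d.getD v 0 + 1))
    PySem.Dict.empty

def totalTime_alt (n : Int) (arr : List Int) (time : List Int) : Int :=
  ((pvCount n arr).items.foldl
      (fun tot p =>
        tot + (if p.2 == 1 then (1 : Int)
               else 1 + (p.2 - 1) * PySem.List.pyGetD time (p.1 - 1) 0))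
      0) - 1

-- ===== PRECONDITION & SPEC =====
-- Pre_ excludes exactly the inputs where A raises: n > len(arr) (IndexError on arr[i]) and
-- repeated values v among the first n elements with time[v-1] out of range (IndexError on time[v-1]).
def Pre_totalTime (n : Int) (arr : List Int) (time : List Int) : Prop :=
  n ≤ (arr.length : Int) ∧
  ∀ v ∈ arr.take n.toNat, 2 ≤ (arr.take n.toNat).count v →
    PySem.Raise.InRange time.length (v - 1)
instance (n : Int) (arr : List Int) (time : List Int) : Decidable (Pre_totalTime n arr time) := by unfold Pre_totalTime; infer_instance
def pvWitness_totalTime : Int × List Int × List Int := (4, [1, 2, 1, 2], [3, 5])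

def Spec_totalTime (n : Int) (arr : List Int) (time : List Int) (out : Int) : Prop := out = totalTime_alt n arr time
instance (n : Int) (arr : List Int) (time : List Int) (out : Int) : Decidable (Spec_totalTime n arr time out) := by unfold Spec_totalTime; infer_instance

-- ===== CLAIM (what is proved, stated in full; the proofs are below) =====
def Claim_equal_totalTime : Prop := ∀ (n : Int) (arr : List Int) (time : List Int), Dom_totalTime n arr time → Pre_totalTime n arr time → Spec_totalTime n arr time (totalTime n arr time)

-- ===== LEMMAS AND PROOFS =====

-- t(v) = time[v-1] with default 0 (only read under Pre_)
def pvTv (time : List Int) (v : Int) : Int := PySem.List.pyGetD time (v - 1) 0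

-- the common mathematical value both loops compute (before the final -1)
def pvG (time : List Int) (L : List Int) : Int :=
  ((PySem.Set.ofList L).map (fun k => 1 + ((L.count k : Int) - 1) * pvTv time k)).sum

lemma pv_sum_ite (S : List Int) (v c : Int) (hn : S.Nodup) (hv : v ∈ S) :
    (S.map (fun k => if k = v then c else 0)).sum = c := by
  induction S with
  | nil => cases hv
  | cons x S ih =>
    simp only [List.map_cons, List.sum_cons]
    by_cases hx : x = v
    · subst hx
      have hnin : x ∉ S := (List.nodup_cons.mp hn).1
      have : ∀ k ∈ S, (if k = x then c else 0) = 0 := by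
        intro k hk
        have : k ≠ x := fun h => hnin (h ▸ hk)
        simp [this]
      rw [List.map_congr_left this]
      simp
    · have hv' : v ∈ S := by
        rcases List.mem_cons.mp hv with h | h
        · exact absurd h.symm hx
        · exact h
      rw [ih (List.nodup_cons.mp hn).2 hv']
      simp [hx]

lemma pvG_append (time : List Int) (L : List Int) (v : Int) :
    pvG time (L ++ [v]) = pvG time L + (if v ∈ L then pvTv time v else 1) := by
  by_cases hv : v ∈ L
  · have hS : PySem.Set.ofList (L ++ [v]) = PySem.Set.ofList L := by
      rw [PySem.Set.ofList_append_singleton, PySem.Set.add_of_mem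
        ((PySem.Set.mem_ofList _ _).mpr hv)]
    have hpt : ∀ k ∈ PySem.Set.ofList L,
        (1 + (((L ++ [v]).count k : Int) - 1) * pvTv time k)
          = (1 + ((L.count k : Int) - 1) * pvTv time k)
            + (if k = v then pvTv time v else 0) := by
      intro k _
      by_cases hk : k = v
      · subst hk
        have hcnt : (L ++ [k]).count k = L.count k + 1 := by
          simp [List.count_append]
        rw [hcnt]
        push_cast
        simp
        ring
      · have hcnt : (L ++ [v]).count k = L.count k := by
          simp only [List.count_append, List.count_singleton]
          have : ¬v = k := fun h => hk h.symm
          simp [this]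
        rw [hcnt]
        simp [hk]
    unfold pvG
    rw [hS, List.map_congr_left hpt]
    rw [PySem.List.sum_map_add_int,
      pv_sum_ite _ v _ (PySem.Set.nodup_ofList L) ((PySem.Set.mem_ofList _ _).mpr hv)]
    simp [hv]
  · have hS : PySem.Set.ofList (L ++ [v]) = PySem.Set.ofList L ++ [v] := by
      rw [PySem.Set.ofList_append_singleton, PySem.Set.add_of_not_mem
        (fun h => hv ((PySem.Set.mem_ofList _ _).mp h))]
    have hpt : ∀ k ∈ PySem.Set.ofList L,
        (1 + (((L ++ [v]).count k : Int) - 1) * pvTv time k)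
          = 1 + ((L.count k : Int) - 1) * pvTv time k := by
      intro k hk
      have hk' : k ≠ v := fun h => hv (h ▸ (PySem.Set.mem_ofList _ _).mp hk)
      have hcnt : (L ++ [v]).count k = L.count k := by
        simp only [List.count_append, List.count_singleton]
        have : ¬v = k := fun h => hk' h.symm
        simp [this]
      rw [hcnt]
    have hcv : (L ++ [v]).count v = 1 := by
      rw [List.count_append, List.count_eq_zero_of_not_mem hv]
      simp
    unfold pvG
    rw [hS, List.map_append, List.sum_append, List.map_congr_left hpt]
    simp [hv, List.count_eq_zero_of_not_mem hv]

-- A's loop state after processing range(0, t): keys of the dict and the running total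
lemma pvA_loop (arr time : List Int) (t : Nat) (ht : t ≤ arr.length) :
    (((PySem.List.pyRange 0 (t : Int) 1).foldl
        (fun (st : PySem.Dict Int Int × Int) i =>
          let v := PySem.List.pyGetD arr i 0
          if st.1.contains v = false then
            (st.1.insert v i, st.2 + 1)
          else
            (st.1.insert v i, st.2 + PySem.List.pyGetD time (v - 1) 0))
        (PySem.Dict.empty, 0)).1.keys = PySem.Set.ofList (arr.take t)) ∧
    (((PySem.List.pyRange 0 (t : Int) 1).foldl
        (fun (st : PySem.Dict Int Int × Int) i =>
          let v := PySem.List.pyGetD arr i 0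
          if st.1.contains v = false then
            (st.1.insert v i, st.2 + 1)
          else
            (st.1.insert v i, st.2 + PySem.List.pyGetD time (v - 1) 0))
        (PySem.Dict.empty, 0)).2 = pvG time (arr.take t)) := by
  induction t with
  | zero =>
    simp [PySem.List.pyRange_one_eq_nil, PySem.Set.ofList_nil, pvG]
  | succ t ih =>
    have ht' : t ≤ arr.length := Nat.le_of_succ_le ht
    have htlt : t < arr.length := ht
    obtain ⟨ihk, ihs⟩ := ih ht'
    have hrng : PySem.List.pyRange 0 ((t + 1 : Nat) : Int) 1
        = PySem.List.pyRange 0 (t : Int) 1 ++ [(t : Int)] := by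
      push_cast
      exact PySem.List.pyRange_one_succ_right (by positivity)
    have hget : PySem.List.pyGetD arr (t : Int) 0 = arr[t] := by
      rw [PySem.List.pyGetD_natCast, List.getD_eq_getElem _ _ htlt]
    have htake : arr.take (t + 1) = arr.take t ++ [arr[t]] := by
      rw [List.take_add_one, List.getElem?_eq_getElem htlt]; rfl
    rw [hrng, List.foldl_append]
    simp only [List.foldl_cons, List.foldl_nil, hget]
    have hcont : (((PySem.List.pyRange 0 (t : Int) 1).foldl
        (fun (st : PySem.Dict Int Int × Int) i =>
          let v := PySem.List.pyGetD arr i 0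
          if st.1.contains v = false then
            (st.1.insert v i, st.2 + 1)
          else
            (st.1.insert v i, st.2 + PySem.List.pyGetD time (v - 1) 0))
        (PySem.Dict.empty, 0)).1.contains arr[t])
        = decide (arr[t] ∈ arr.take t) := by
      rw [PySem.Dict.contains_eq_decide_mem_keys, ihk]
      simp [PySem.Set.mem_ofList]
    by_cases hmem : arr[t] ∈ arr.take t
    · rw [hcont]
      simp only [hmem, decide_true, Bool.true_eq_false, if_false]
      constructor
      · rw [PySem.Dict.keys_insert_of_contains, ihk, htake]
        · rw [PySem.Set.ofList_append_singleton,
            PySem.Set.add_of_mem ((PySem.Set.mem_ofList _ _).mpr hmem)]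
        · rw [PySem.Dict.contains_eq_decide_mem_keys, ihk]
          simp [PySem.Set.mem_ofList, hmem]
      · rw [ihs, htake, pvG_append]
        simp [hmem, pvTv]
    · rw [hcont]
      simp only [hmem, decide_false, if_true]
      constructor
      · rw [PySem.Dict.keys_insert_of_not_contains, ihk, htake]
        · rw [PySem.Set.ofList_append_singleton,
            PySem.Set.add_of_not_mem (fun h => hmem ((PySem.Set.mem_ofList _ _).mp h))]
        · rw [PySem.Dict.contains_eq_decide_mem_keys, ihk]
          simp [PySem.Set.mem_ofList, hmem]
      · rw [ihs, htake, pvG_append]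
        simp [hmem]

-- B's counting loop over range(0, t) builds Counter(arr[:t])
lemma pvB_loop (arr : List Int) (t : Nat) (ht : t ≤ arr.length) :
    pvCount (t : Int) arr = PySem.Dict.counter (arr.take t) := by
  induction t with
  | zero =>
    simp [pvCount, PySem.List.pyRange_one_eq_nil]
    rfl
  | succ t ih =>
    have ht' : t ≤ arr.length := Nat.le_of_succ_le ht
    have htlt : t < arr.length := ht
    have hrng : PySem.List.pyRange 0 ((t + 1 : Nat) : Int) 1
        = PySem.List.pyRange 0 (t : Int) 1 ++ [(t : Int)] := by
      push_cast
      exact PySem.List.pyRange_one_succ_right (by positivity)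
    have hget : PySem.List.pyGetD arr (t : Int) 0 = arr[t] := by
      rw [PySem.List.pyGetD_natCast, List.getD_eq_getElem _ _ htlt]
    have htake : arr.take (t + 1) = arr.take t ++ [arr[t]] := by
      rw [List.take_add_one, List.getElem?_eq_getElem htlt]; rfl
    unfold pvCount at ih ⊢
    rw [hrng, List.foldl_append, ih ht', htake,
      ← PySem.Dict.foldl_insert_getD_add_one_eq_counter,
      ← PySem.Dict.foldl_insert_getD_add_one_eq_counter, List.foldl_append]
    simp only [List.foldl_cons, List.foldl_nil, hget]

-- B's aggregation over Counter(L).items equals pvG time L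
lemma pvB_sum (time : List Int) (L : List Int) :
    ((PySem.Dict.counter L).items.foldl
        (fun tot (p : Int × Int) =>
          tot + (if p.2 == 1 then (1 : Int)
                 else 1 + (p.2 - 1) * PySem.List.pyGetD time (p.1 - 1) 0))
        0) = pvG time L := by
  rw [PySem.List.foldl_add, PySem.Dict.items_counter, List.map_map]
  have hpt : ∀ k ∈ PySem.Set.ofList L,
      ((fun p : Int × Int =>
          (if p.2 == 1 then (1 : Int)
           else 1 + (p.2 - 1) * PySem.List.pyGetD time (p.1 - 1) 0)) ∘
        fun k => (k, (L.count k : Int))) k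
        = 1 + ((L.count k : Int) - 1) * pvTv time k := by
    intro k hk
    have hkL : k ∈ L := (PySem.Set.mem_ofList _ _).mp hk
    have hc : 1 ≤ L.count k := List.count_pos_iff.mpr hkL
    simp only [Function.comp]
    by_cases h1 : L.count k = 1
    · simp [h1, pvTv]
    · have : ((L.count k : Int)) ≠ 1 := by exact_mod_cast h1
      simp [this, pvTv]
  rw [List.map_congr_left hpt]
  unfold pvG
  ring

-- ===== VERDICT (by name: the statement is the Claim_ definition above) =====
theorem totalTime_spec : Claim_equal_totalTime := by
  intro n arr time _ hpre
  unfold Pre_totalTime at hpre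
  obtain ⟨hlen, -⟩ := hpre
  unfold Spec_totalTime totalTime totalTime_alt pvCount
  by_cases hn : n ≤ 0
  · rw [PySem.List.pyRange_one_eq_nil hn]
    rfl
  · have hn0 : 0 ≤ n := le_of_lt (lt_of_not_ge hn)
    have ht : n.toNat ≤ arr.length := by omega
    have hcast : n = ((n.toNat : Nat) : Int) := (Int.toNat_of_nonneg hn0).symm
    rw [hcast]
    have hB := pvB_loop arr n.toNat ht
    unfold pvCount at hB
    rw [hB, pvB_sum, (pvA_loop arr time n.toNat ht).2]
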